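-- pv_equiv track=rewrite | github.com/exaon18/crack_the_code | Games/consumers.py | count_completed_lines
-- ===== SOURCE A (Python) =====
-- def count_completed_lines(board):
--     completed = 0
--     size = len(board)
--
--     # Check rows
--     for row in board:
--         if all(cell == 0 for cell in row):
--             completed += 1
--
--     # Check columns
--     for j in range(size):
--         if all(board[i][j] == 0 for i in range(size)):
--             completed += 1
--
--     # Check main diagonal
--     if all(board[i][i] == 0 for i in range(size)):
--         completed += 1
--
--     # Check anti-diagonal
--     if all(board[i][size - 1 - i] == 0 for i in range(size)):
--         completed += 1
--
--     return completed
-- ===== SOURCE B (Python) =====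
-- def count_completed_lines(board):
--     size = len(board)
--     completed = 0
--     col = [0] * size
--     diag = anti = 0
--     for i, row in enumerate(board):
--         if not any(row):
--             completed += 1
--         col = [c + (row[j] == 0) for j, c in enumerate(col)]
--         if row[i] == 0:
--             diag += 1
--         if row[size - 1 - i] == 0:
--             anti += 1
--     completed += sum(1 for c in col if c == size)
--     if diag == size:
--         completed += 1
--     if anti == size:
--         completed += 1
--     return completed
-- ===== Notes on version B (the rewrite author's own statement) =====
-- stated objective: alternative
-- what changed: Replaces A's four separate scans (per-row pass, per-column all() scan, two diagonal scans) by one fused pass over the rows that maintains per-column/diagonal zero counters and compares them to the size at the end.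
-- outside the precondition, e.g. on count_completed_lines([[1, 2], [3]]): A returns 0, B raises IndexError
import Mathlib
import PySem

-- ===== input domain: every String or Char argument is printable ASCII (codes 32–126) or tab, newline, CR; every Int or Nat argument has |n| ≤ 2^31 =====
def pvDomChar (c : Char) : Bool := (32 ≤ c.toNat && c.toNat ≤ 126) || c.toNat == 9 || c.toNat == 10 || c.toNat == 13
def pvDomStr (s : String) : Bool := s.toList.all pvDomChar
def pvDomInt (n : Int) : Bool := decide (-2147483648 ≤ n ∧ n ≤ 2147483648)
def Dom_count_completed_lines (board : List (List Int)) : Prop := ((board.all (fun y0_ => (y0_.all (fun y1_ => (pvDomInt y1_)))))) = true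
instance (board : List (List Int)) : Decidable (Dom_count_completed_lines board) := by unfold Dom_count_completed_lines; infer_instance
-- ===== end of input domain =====

-- B replaces A's four separate scans (rows, per-column all(), two diagonals) by one fused pass
-- over the rows maintaining column/diagonal zero counters (alternative decomposition, same cost).

-- ===== PORT A =====
-- board[i][j] is ported as pyGetD … with defaults ([] for a row, 1 for a cell); this is exact under
-- Pre_count_completed_lines, where every index Python evaluates is in range (no IndexError).
def count_completed_lines (board : List (List Int)) : Int :=
  let size : Int := (board.length : Int)
  let completed : Int :=
    board.foldl (fun acc row => if row.all (fun c => c == 0) then acc + 1 else acc) 0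
  let completed : Int :=
    (PySem.List.pyRange 0 size 1).foldl (fun acc j =>
      if (PySem.List.pyRange 0 size 1).all
          (fun i => PySem.List.pyGetD (PySem.List.pyGetD board i []) j 1 == 0)
      then acc + 1 else acc) completed
  let completed : Int :=
    if (PySem.List.pyRange 0 size 1).all
        (fun i => PySem.List.pyGetD (PySem.List.pyGetD board i []) i 1 == 0)
    then completed + 1 else completed
  if (PySem.List.pyRange 0 size 1).all
      (fun i => PySem.List.pyGetD (PySem.List.pyGetD board i []) (size - 1 - i) 1 == 0)
  then completed + 1 else completed

-- ===== PORT B =====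
-- One fold over enumerate(board) with state (completed, col, diag, anti); row[j] is ported as
-- pyGetD row j 1 (exact under Pre_count_completed_lines, where the index is in range).
def count_completed_lines_alt (board : List (List Int)) : Int :=
  let size : Int := (board.length : Int)
  let st : Int × List Int × Int × Int :=
    (PySem.List.enumerate board 0).foldl
      (fun (st : Int × List Int × Int × Int) p =>
        (if !(p.2.any fun c => !(c == 0)) then st.1 + 1 else st.1,
         (PySem.List.enumerate st.2.1 0).map
           (fun q => q.2 + (if PySem.List.pyGetD p.2 q.1 1 == 0 then 1 else 0)),
         (if PySem.List.pyGetD p.2 p.1 1 == 0 then st.2.2.1 + 1 else st.2.2.1),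
         (if PySem.List.pyGetD p.2 (size - 1 - p.1) 1 == 0 then st.2.2.2 + 1 else st.2.2.2)))
      (0, List.replicate size.toNat 0, 0, 0)
  let completed : Int := st.2.1.foldl (fun acc c => if c == size then acc + 1 else acc) st.1
  let completed : Int := if st.2.2.1 == size then completed + 1 else completed
  if st.2.2.2 == size then completed + 1 else completed

-- ===== PRECONDITION & SPEC =====
-- Pre_ excludes ragged boards (a row shorter than the number of rows): there the column/diagonal
-- indexing board[i][j] may raise IndexError in Python (B always does; A may still return a value
-- when a short-circuiting all() stops before the short row is indexed — an accident of scan order).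
def Pre_count_completed_lines (board : List (List Int)) : Prop :=
  ∀ row ∈ board, board.length ≤ row.length
instance (board : List (List Int)) : Decidable (Pre_count_completed_lines board) := by
  unfold Pre_count_completed_lines; infer_instance
def pvWitness_count_completed_lines : List (List Int) := [[0, 1], [0, 0]]
def Spec_count_completed_lines (board : List (List Int)) (out : Int) : Prop := out = count_completed_lines_alt board
instance (board : List (List Int)) (out : Int) : Decidable (Spec_count_completed_lines board out) := by unfold Spec_count_completed_lines; infer_instance

-- ===== CLAIM (what is proved, stated in full; the proofs are below) =====
def Claim_equal_count_completed_lines : Prop := ∀ (board : List (List Int)), Dom_count_completed_lines board → Pre_count_completed_lines board → Spec_count_completed_lines board (count_completed_lines board)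

-- ===== LEMMAS AND PROOFS =====

-- B's 4-component fold splits into four independent folds
theorem pv_split (l : List (Int × List Int)) (size : Int) (a : Int) (b : List Int) (c d : Int) :
    l.foldl (fun (st : Int × List Int × Int × Int) p =>
        (if !(p.2.any fun c => !(c == 0)) then st.1 + 1 else st.1,
         (PySem.List.enumerate st.2.1 0).map
           (fun q => q.2 + (if PySem.List.pyGetD p.2 q.1 1 == 0 then 1 else 0)),
         (if PySem.List.pyGetD p.2 p.1 1 == 0 then st.2.2.1 + 1 else st.2.2.1),
         (if PySem.List.pyGetD p.2 (size - 1 - p.1) 1 == 0 then st.2.2.2 + 1 else st.2.2.2)))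
      (a, b, c, d)
    = (l.foldl (fun acc p => if !(p.2.any fun c => !(c == 0)) then acc + 1 else acc) a,
       l.foldl (fun col p => (PySem.List.enumerate col 0).map
           (fun q => q.2 + (if PySem.List.pyGetD p.2 q.1 1 == 0 then 1 else 0))) b,
       l.foldl (fun acc p => if PySem.List.pyGetD p.2 p.1 1 == 0 then acc + 1 else acc) c,
       l.foldl (fun acc p => if PySem.List.pyGetD p.2 (size - 1 - p.1) 1 == 0 then acc + 1 else acc) d) := by
  induction l generalizing a b c d with
  | nil => rfl
  | cons x xs ih => simp only [List.foldl_cons]; rw [ih]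

-- a fold over enumerate that ignores the index is a fold over the list
theorem pv_foldl_enumerate_snd {α β : Type} (xs : List α) (s : Int) (g : β → α → β) (init : β) :
    (PySem.List.enumerate xs s).foldl (fun acc p => g acc p.2) init = xs.foldl g init := by
  conv_rhs => rw [← PySem.List.map_snd_enumerate xs s]
  rw [List.foldl_map]

-- "zero-count equals length iff every element is zero", as Bool equations
theorem pv_count_eq_all {α : Type} (l : List α) (p : α → Bool) :
    (((l.countP p : Int)) == ((l.length : Int))) = l.all p := by
  rw [Bool.eq_iff_iff]
  simp [List.countP_eq_length, List.all_eq_true]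

theorem pv_range_count_eq_all (n : Nat) (p : Int → Bool) :
    ((((PySem.List.pyRange 0 (n : Int) 1).countP p : Int)) == ((n : Int)))
      = (PySem.List.pyRange 0 (n : Int) 1).all p := by
  have h : (PySem.List.pyRange 0 (n : Int) 1).length = n := by
    simp [PySem.List.length_pyRange_one]
  have h2 := pv_count_eq_all (PySem.List.pyRange 0 (n : Int) 1) p
  rw [h] at h2
  exact h2

-- a range-all over board indices is a list-all over the rows
theorem pv_all_range (board : List (List Int)) (p : List Int → Bool) :
    (PySem.List.pyRange 0 (board.length : Int) 1).all
        (fun i => p (PySem.List.pyGetD board i [])) = board.all p := by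
  conv_rhs => rw [← PySem.List.map_pyGetD_pyRange_zero' board []]
  rw [List.all_map]
  rfl

theorem pv_colcond (board : List (List Int)) (j : Int) :
    (((board.countP (fun row => PySem.List.pyGetD row j 1 == 0) : Int)) == ((board.length : Int)))
      = (PySem.List.pyRange 0 (board.length : Int) 1).all
          (fun i => PySem.List.pyGetD (PySem.List.pyGetD board i []) j 1 == 0) := by
  rw [pv_count_eq_all, ← pv_all_range board (fun row => PySem.List.pyGetD row j 1 == 0)]

-- the column step of B, on a column list that is a map over the index range
theorem pv_col_step (row : List Int) (n : Nat) (f : Int → Int) :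
    (PySem.List.enumerate ((PySem.List.pyRange 0 (n : Int) 1).map f) 0).map
        (fun q => q.2 + (if PySem.List.pyGetD row q.1 1 == 0 then 1 else 0))
      = (PySem.List.pyRange 0 (n : Int) 1).map
        (fun j => f j + (if PySem.List.pyGetD row j 1 == 0 then 1 else 0)) := by
  rw [PySem.List.enumerate_eq_map_pyRange (d := 0)]
  have hl : PySem.List.len ((PySem.List.pyRange 0 (n : Int) 1).map f) = (n : Int) := by
    simp [PySem.List.len_eq, PySem.List.length_pyRange_one]
  rw [hl, List.map_map]
  refine List.map_congr_left ?_
  intro j hj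
  rcases (PySem.List.mem_pyRange_one).1 hj with ⟨h0, h1⟩
  simp only [Function.comp]
  rw [PySem.List.pyGetD_map_pyRange_of_nonneg f (n : Int) j 0 h0 h1]

-- the accumulated column list after folding all rows
theorem pv_col_fold (rs : List (List Int)) (n : Nat) (f : Int → Int) :
    rs.foldl (fun col row =>
        (PySem.List.enumerate col 0).map
          (fun q => q.2 + (if PySem.List.pyGetD row q.1 1 == 0 then 1 else 0)))
      ((PySem.List.pyRange 0 (n : Int) 1).map f)
    = (PySem.List.pyRange 0 (n : Int) 1).map
        (fun j => f j + (rs.countP (fun row => PySem.List.pyGetD row j 1 == 0) : Int)) := by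
  induction rs generalizing f with
  | nil => simp
  | cons r rs ih =>
    rw [List.foldl_cons, pv_col_step r n f, ih]
    refine List.map_congr_left ?_
    intro j _
    rw [List.countP_cons]
    by_cases h : PySem.List.pyGetD r j 1 == 0 <;> simp [h]; ring

theorem pv_main (board : List (List Int)) :
    count_completed_lines board = count_completed_lines_alt board := by
  unfold count_completed_lines count_completed_lines_alt
  dsimp only
  rw [pv_split]
  rw [pv_foldl_enumerate_snd board 0
      (fun acc row => if !(row.any fun c => !(c == 0)) then acc + 1 else acc) 0]
  rw [pv_foldl_enumerate_snd board 0
      (fun col row => (PySem.List.enumerate col 0).map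
        (fun q => q.2 + (if PySem.List.pyGetD row q.1 1 == 0 then 1 else 0)))
      (List.replicate ((board.length : Int)).toNat 0)]
  rw [show (List.replicate ((board.length : Int)).toNat (0 : Int))
        = (PySem.List.pyRange 0 (board.length : Int) 1).map (fun _ => 0) from by
      rw [List.map_const', PySem.List.length_pyRange_one]; simp]
  rw [pv_col_fold board board.length (fun _ => 0)]
  rw [PySem.List.enumerate_eq_map_pyRange (d := ([] : List Int))]
  simp only [PySem.List.len_eq, List.foldl_map]
  simp only [PySem.List.foldl_if_add_one, zero_add]
  rw [show List.countP (fun row => !(row.any fun c => !(c == 0))) board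
        = List.countP (fun row => row.all (fun c => c == 0)) board from
      List.countP_congr (fun row _ => by simp [List.all_eq_not_any_not])]
  rw [show List.countP
        (fun j => ((board.countP (fun row => PySem.List.pyGetD row j 1 == 0) : Int))
          == ((board.length : Int))) (PySem.List.pyRange 0 (board.length : Int) 1)
      = List.countP
        (fun j => (PySem.List.pyRange 0 (board.length : Int) 1).all
          (fun i => PySem.List.pyGetD (PySem.List.pyGetD board i []) j 1 == 0))
        (PySem.List.pyRange 0 (board.length : Int) 1) from
      List.countP_congr (fun j _ => by rw [pv_colcond board j])]
  rw [pv_range_count_eq_all board.length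
      (fun i => PySem.List.pyGetD (PySem.List.pyGetD board i []) i 1 == 0)]
  rw [pv_range_count_eq_all board.length
      (fun i => PySem.List.pyGetD (PySem.List.pyGetD board i [])
        ((board.length : Int) - 1 - i) 1 == 0)]

-- ===== VERDICT (by name: the statement is the Claim_ definition above) =====
theorem count_completed_lines_spec : Claim_equal_count_completed_lines := by
  intro board _ _
  unfold Spec_count_completed_lines
  exact pv_main board
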